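-- pv_equiv track=rewrite | github.com/kirtan226/python-practice-programs | broken_keyboard_vowel.py | type_with_broken_keyboard
-- ===== SOURCE A (Python) =====
-- def type_with_broken_keyboard(word):
--     new=''
--     v = 'aeiou'
--     word = word.lower()
--     v_count=0
--     for char in word:
--         if char in v:
--             v_count+=1
--
--         if v_count%2==0:
--             new =new+char.lower()
--         else:
--            new =new+char.upper()
--     return new
-- ===== SOURCE B (Python) =====
-- def type_with_broken_keyboard(word):
--     # Block decomposition: each maximal block [vowel, following non-vowels]
--     # is cased as a whole, alternating starting with UPPER at the first vowel;
--     # the prefix before the first vowel stays as-is (lowercase).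
--     s = word.lower()
--     parts = []
--     odd = False
--     while True:
--         i = next((j for j, ch in enumerate(s) if ch in 'aeiou'), -1)
--         if i < 0:
--             parts.append(s.upper() if odd else s)
--             return ''.join(parts)
--         pre, v, s = s[:i], s[i], s[i + 1:]
--         if odd:
--             parts.append(pre.upper() + v)
--             odd = False
--         else:
--             parts.append(pre + v.upper())
--             odd = True
-- ===== Notes on version B (the rewrite author's own statement) =====
-- stated objective: alternative
-- what changed: Replaces A's per-character loop with a running vowel counter by a block decomposition: repeatedly locate the next vowel, emit the whole pre-vowel segment and the vowel cased at once by an alternating boolean flag, and continue on the remainder; no counter and no per-character case decision.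
import Mathlib
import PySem

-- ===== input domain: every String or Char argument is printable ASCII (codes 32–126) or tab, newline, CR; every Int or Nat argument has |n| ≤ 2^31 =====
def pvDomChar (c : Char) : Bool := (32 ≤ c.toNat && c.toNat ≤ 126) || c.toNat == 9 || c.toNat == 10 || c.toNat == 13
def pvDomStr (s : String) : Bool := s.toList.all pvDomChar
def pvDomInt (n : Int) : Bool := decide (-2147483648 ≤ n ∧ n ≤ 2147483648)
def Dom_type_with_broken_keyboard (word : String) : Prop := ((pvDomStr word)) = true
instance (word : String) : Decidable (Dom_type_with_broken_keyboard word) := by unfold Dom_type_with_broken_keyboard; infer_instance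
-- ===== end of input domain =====

-- B replaces A's per-character counter loop by a block decomposition: repeatedly find the
-- next vowel and case the whole block (prefix, then vowel) at once, alternating a flag; objective: alternative.

-- ===== PORT A =====
-- A: one loop carrying (running vowel count, accumulated string), re-lowering/uppering each char.
def type_with_broken_keyboard (word : String) : String :=
  let w := PySem.Chars.lower word.toList        -- word = word.lower()
  let res := w.foldl (fun (st : Nat × List Char) char =>
      let v_count := if char ∈ ['a','e','i','o','u'] then st.1 + 1 else st.1
      let new := if v_count % 2 == 0 then st.2 ++ [PySem.Chars.lowerChar char]
                 else st.2 ++ [PySem.Chars.upperChar char]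
      (v_count, new)) (0, [])
  String.mk res.2

-- ===== PORT B =====
-- B's while loop: find the first vowel index (`next(… enumerate …, -1)` = findIdx?),
-- emit the pre-vowel segment and the vowel cased by the parity flag, continue on the rest.
-- s[i] is ported as getElem! — findIdx? guarantees the index is in range, as enumerate does in Python.
def altLoop (parts : List Char) (odd : Bool) (s : List Char) : List Char :=
  match h : s.findIdx? (fun ch => ch ∈ ['a','e','i','o','u']) with
  | none => parts ++ (if odd then PySem.Chars.upper s else s)
  | some i =>
    let pre := s.take i                                   -- s[:i]
    let v := s[i]!                                        -- s[i]
    let rest := s.drop (i + 1)                            -- s[i+1:]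
    if odd then altLoop (parts ++ PySem.Chars.upper pre ++ [v]) false rest
    else altLoop (parts ++ pre ++ [PySem.Chars.upperChar v]) true rest
termination_by s.length
decreasing_by
  all_goals
    have hlt : i < s.length := (List.findIdx?_eq_some_iff_findIdx_eq.mp h).1
    simp only [List.length_drop]; omega

def type_with_broken_keyboard_alt (word : String) : String :=
  String.mk (altLoop [] false (PySem.Chars.lower word.toList))

-- ===== PRECONDITION & SPEC =====
def Spec_type_with_broken_keyboard (word : String) (out : String) : Prop := out = type_with_broken_keyboard_alt word
instance (word : String) (out : String) : Decidable (Spec_type_with_broken_keyboard word out) := by unfold Spec_type_with_broken_keyboard; infer_instance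

-- ===== CLAIM =====
def Claim_equal_type_with_broken_keyboard : Prop := ∀ (word : String), Dom_type_with_broken_keyboard word → Spec_type_with_broken_keyboard word (type_with_broken_keyboard word)

-- ===== LEMMAS AND PROOFS =====

-- reference output of A's loop starting at vowel count c
def refOut (c : Nat) : List Char → List Char
  | [] => []
  | ch :: t =>
    let c' := if ch ∈ ['a','e','i','o','u'] then c + 1 else c
    (if c' % 2 == 0 then PySem.Chars.lowerChar ch else PySem.Chars.upperChar ch) :: refOut c' t

theorem lowerChar_idem (c : Char) :
    PySem.Chars.lowerChar (PySem.Chars.lowerChar c) = PySem.Chars.lowerChar c := by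
  simp only [PySem.Chars.lowerChar, PySem.Chars.isupper]
  split
  · next h =>
    rw [Bool.and_eq_true, decide_eq_true_eq, decide_eq_true_eq, Char.le_def, Char.le_def] at h
    have h65 : 65 ≤ c.toNat := h.1
    have h90 : c.toNat ≤ 90 := h.2
    have hv : (c.toNat + 32).isValidChar := by
      left; change c.toNat + 32 < 55296; omega
    have ht : (Char.ofNat (c.toNat + 32)).toNat = c.toNat + 32 := by
      rw [Char.toNat_ofNat]; simp [Nat.isValidChar] at hv ⊢; omega
    have hne : ¬ ((decide ('A' ≤ Char.ofNat (c.toNat + 32)) && decide (Char.ofNat (c.toNat + 32) ≤ 'Z')) = true) := by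
      rw [Bool.and_eq_true, decide_eq_true_eq, decide_eq_true_eq, Char.le_def, Char.le_def]
      intro ⟨_, h2⟩
      have h2' : (Char.ofNat (c.toNat + 32)).toNat ≤ 90 := h2
      omega
    simp [hne]
  · rfl

theorem foldA_eq (w : List Char) : ∀ (c : Nat) (acc : List Char),
    (w.foldl (fun (st : Nat × List Char) char =>
      let v_count := if char ∈ ['a','e','i','o','u'] then st.1 + 1 else st.1
      let new := if v_count % 2 == 0 then st.2 ++ [PySem.Chars.lowerChar char]
                 else st.2 ++ [PySem.Chars.upperChar char]
      (v_count, new)) (c, acc)).2 = acc ++ refOut c w := by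
  induction w with
  | nil => intro c acc; simp [refOut]
  | cons ch t ih =>
    intro c acc
    simp only [List.foldl_cons, refOut]
    split <;> · rw [ih]; split <;> simp

-- on a vowel-free, all-lowercase segment, A's loop keeps the parity and cases uniformly
theorem refOut_append_novowel (xs : List Char)
    (hnv : ∀ ch ∈ xs, ch ∉ (['a','e','i','o','u'] : List Char))
    (hlo : ∀ ch ∈ xs, PySem.Chars.lowerChar ch = ch) :
    ∀ (c : Nat) (ys : List Char),
    refOut c (xs ++ ys) = (if c % 2 = 0 then xs else xs.map PySem.Chars.upperChar) ++ refOut c ys := by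
  induction xs with
  | nil => intro c ys; simp
  | cons ch t ih =>
    intro c ys
    have hch : ch ∉ (['a','e','i','o','u'] : List Char) := hnv ch (List.mem_cons_self)
    have hlch : PySem.Chars.lowerChar ch = ch := hlo ch (List.mem_cons_self)
    have ht : ∀ x ∈ t, x ∉ (['a','e','i','o','u'] : List Char) := fun x hx => hnv x (List.mem_cons_of_mem _ hx)
    have htl : ∀ x ∈ t, PySem.Chars.lowerChar x = x := fun x hx => hlo x (List.mem_cons_of_mem _ hx)
    simp only [List.cons_append, refOut, if_neg hch, ih ht htl c ys]
    rcases Nat.mod_two_eq_zero_or_one c with h | h <;> simp [h, hlch]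

theorem altLoop_eq (n : Nat) : ∀ (s : List Char), s.length ≤ n →
    (∀ ch ∈ s, PySem.Chars.lowerChar ch = ch) →
    ∀ (c : Nat) (parts : List Char),
    altLoop parts (decide (c % 2 = 1)) s = parts ++ refOut c s := by
  induction n with
  | zero =>
    intro s hs _ c parts
    have : s = [] := List.eq_nil_of_length_eq_zero (Nat.le_zero.mp hs)
    subst this
    rw [altLoop]
    simp [refOut, PySem.Chars.upper]
  | succ n ih =>
    intro s hs hlo c parts
    rw [altLoop]
    split
    · -- no vowel left
      next h =>
      have hnv : ∀ ch ∈ s, ch ∉ (['a','e','i','o','u'] : List Char) := by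
        intro ch hch
        have := List.findIdx?_eq_none_iff.mp h ch hch
        simpa using this
      have := refOut_append_novowel s hnv hlo c []
      simp only [List.append_nil, refOut] at this
      rw [this]
      rcases Nat.mod_two_eq_zero_or_one c with hc | hc <;>
        simp [hc, PySem.Chars.upper]
    · -- vowel at index i
      next i h =>
      obtain ⟨hlt, hidx⟩ := List.findIdx?_eq_some_iff_findIdx_eq.mp h
      have hvset : s[i]! ∈ (['a','e','i','o','u'] : List Char) := by
        have := List.findIdx_getElem (p := fun ch => ch ∈ ['a','e','i','o','u']) (xs := s) (w := hidx ▸ hlt)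
        simp only [hidx] at this
        simp only [List.getElem!_eq_getElem?_getD, List.getElem?_eq_getElem hlt, Option.getD_some]
        simpa using this
      have hpre : ∀ ch ∈ s.take i, ch ∉ (['a','e','i','o','u'] : List Char) := by
        intro ch hch
        obtain ⟨j, hj, rfl⟩ := List.getElem_of_mem hch
        simp only [List.length_take] at hj
        have hji : j < i := lt_of_lt_of_le hj (min_le_left _ _)
        have hjs : j < s.length := lt_of_lt_of_le hj (min_le_right _ _)
        rw [List.getElem_take]
        have := List.not_of_lt_findIdx (p := fun ch => ch ∈ ['a','e','i','o','u']) (xs := s) (hidx ▸ hji)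
        simpa using this
      have hgi : s[i]! = s[i] := by
        simp [List.getElem!_eq_getElem?_getD, List.getElem?_eq_getElem hlt]
      have hsplit : s = s.take i ++ s[i]! :: s.drop (i + 1) := by
        rw [hgi, List.getElem_cons_drop hlt, List.take_append_drop]
      have hlopre : ∀ ch ∈ s.take i, PySem.Chars.lowerChar ch = ch :=
        fun ch hch => hlo ch (List.mem_of_mem_take hch)
      have hlov : PySem.Chars.lowerChar s[i]! = s[i]! := by
        rw [hgi]; exact hlo _ (List.getElem_mem hlt)
      have hlorest : ∀ ch ∈ s.drop (i + 1), PySem.Chars.lowerChar ch = ch :=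
        fun ch hch => hlo ch (List.mem_of_mem_drop hch)
      have hrlen : (s.drop (i + 1)).length ≤ n := by
        simp only [List.length_drop]; omega
      have hrw : refOut c s =
          (if c % 2 = 0 then s.take i else (s.take i).map PySem.Chars.upperChar) ++
          ((if (c + 1) % 2 == 0 then PySem.Chars.lowerChar s[i]! else PySem.Chars.upperChar s[i]!)
            :: refOut (c + 1) (s.drop (i + 1))) := by
        conv_lhs => rw [hsplit]
        rw [refOut_append_novowel _ hpre hlopre]
        simp only [refOut, if_pos hvset]
      rcases Nat.mod_two_eq_zero_or_one c with hc | hc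
      · have hodd : (decide (c % 2 = 1)) = false := by simp [hc]
        have hc1 : (c + 1) % 2 = 1 := by omega
        rw [hodd]
        simp only [Bool.false_eq_true, if_false]
        have := ih (s.drop (i + 1)) hrlen hlorest (c + 1)
          (parts ++ s.take i ++ [PySem.Chars.upperChar s[i]!])
        rw [show (decide ((c + 1) % 2 = 1)) = true by simp [hc1]] at this
        rw [this, hrw]
        simp [hc, hc1]
      · have hodd : (decide (c % 2 = 1)) = true := by simp [hc]
        have hc1 : (c + 1) % 2 = 0 := by omega
        rw [hodd]
        simp only [if_true]
        have := ih (s.drop (i + 1)) hrlen hlorest (c + 1)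
          (parts ++ PySem.Chars.upper (s.take i) ++ [s[i]!])
        rw [show (decide ((c + 1) % 2 = 1)) = false by simp [hc1]] at this
        rw [this, hrw]
        simp only [PySem.Chars.upper, hc, hc1, if_neg one_ne_zero, beq_self_eq_true, if_true, hlov, List.append_assoc, List.cons_append, List.nil_append]

-- ===== VERDICT =====
theorem type_with_broken_keyboard_spec : Claim_equal_type_with_broken_keyboard := by
  intro word _
  unfold Spec_type_with_broken_keyboard type_with_broken_keyboard type_with_broken_keyboard_alt
  have hlo : ∀ ch ∈ PySem.Chars.lower word.toList, PySem.Chars.lowerChar ch = ch := by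
    intro ch hch
    simp only [PySem.Chars.lower, List.mem_map] at hch
    obtain ⟨x, _, rfl⟩ := hch
    exact lowerChar_idem x
  have := altLoop_eq (PySem.Chars.lower word.toList).length (PySem.Chars.lower word.toList)
    le_rfl hlo 0 []
  rw [show (decide ((0:Nat) % 2 = 1)) = false by decide] at this
  simp only [foldA_eq, List.nil_append, this]
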